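-- pv_equiv track=rewrite | github.com/SpatariuIoanGabriel/University-Projects | Algorithms and Programming/Lab2/domain/numbers.py | filter_negative
-- ===== SOURCE A (Python) =====
-- def filter_negative(my_list):
--     """
--     ex. 12.
--     Keep only negative numbers, remove the other elements
--     :param my_list: my list
--     :return: the list of negative numbers
--     """
--
--     i = 0
--     while i < len(my_list):
--         if my_list[i] >= 0:
--             my_list.pop(i)
--         else:
--             i = i + 1
--     return my_list
-- ===== SOURCE B (Python) =====
-- def filter_negative(my_list):
--     k = 0
--     for x in my_list:
--         if not (x >= 0):
--             my_list[k] = x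
--             k += 1
--     del my_list[k:]
--     return my_list
-- ===== Notes on version B (the rewrite author's own statement) =====
-- stated objective: faster
-- what changed: Replaced A's while-loop with repeated conditional my_list.pop(i) (each pop shifts the tail) by a single-pass in-place two-pointer compaction with a write index followed by one truncation.
import Mathlib
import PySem

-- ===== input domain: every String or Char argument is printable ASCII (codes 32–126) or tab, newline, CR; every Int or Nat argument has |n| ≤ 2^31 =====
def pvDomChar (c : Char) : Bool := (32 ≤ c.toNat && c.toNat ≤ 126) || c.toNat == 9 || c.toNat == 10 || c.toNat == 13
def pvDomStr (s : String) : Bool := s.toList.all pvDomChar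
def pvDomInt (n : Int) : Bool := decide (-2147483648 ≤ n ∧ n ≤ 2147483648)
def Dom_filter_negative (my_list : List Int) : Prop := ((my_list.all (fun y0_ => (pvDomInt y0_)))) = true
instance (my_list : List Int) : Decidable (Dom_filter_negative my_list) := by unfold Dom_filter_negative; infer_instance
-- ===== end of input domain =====

-- B replaces A's quadratic conditional-pop scan by a one-pass in-place write-pointer
-- compaction; both Pythons mutate the argument, the equivalence proved is about the return value.
-- ===== PORT A =====
-- A's while loop: index i over a shrinking list; my_list.pop(i) = List.eraseIdx (in range here).
def filter_negative_loop (l : List Int) (i : Nat) : List Int :=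
  if h : i < l.length then
    if l[i] ≥ 0 then
      filter_negative_loop (l.eraseIdx i) i
    else
      filter_negative_loop l (i + 1)
  else l
termination_by l.length - i
decreasing_by
  · simp [List.length_eraseIdx, h]; omega
  · omega

def filter_negative (my_list : List Int) : List Int :=
  filter_negative_loop my_list 0

-- ===== PORT B =====
-- B's for loop: fold over the original elements with state (buffer, write index k);
-- `my_list[k] = x` is List.set, `del my_list[k:]` is List.take k.
def filter_negative_alt_loop (xs : List Int) (st : List Int × Nat) : List Int × Nat :=
  match xs with
  | [] => st
  | x :: rest =>
      if ! (x ≥ 0) then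
        filter_negative_alt_loop rest (st.1.set st.2 x, st.2 + 1)
      else
        filter_negative_alt_loop rest st

def filter_negative_alt (my_list : List Int) : List Int :=
  let st := filter_negative_alt_loop my_list (my_list, 0)
  st.1.take st.2

-- ===== PRECONDITION & SPEC =====
def Spec_filter_negative (my_list : List Int) (out : List Int) : Prop := out = filter_negative_alt my_list
instance (my_list : List Int) (out : List Int) : Decidable (Spec_filter_negative my_list out) := by unfold Spec_filter_negative; infer_instance

-- ===== CLAIM (what is proved, stated in full; the proofs are below) =====
def Claim_equal_filter_negative : Prop := ∀ (my_list : List Int), Dom_filter_negative my_list → Spec_filter_negative my_list (filter_negative my_list)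

-- ===== LEMMAS AND PROOFS =====

-- ===== VERDICT (by name: the statement is the Claim_ definition above) =====
-- Both sides compute my_list.filter (fun x => decide (x < 0)).

-- A's loop invariant: with the first i elements already kept (all negative region processed),
-- the result is the kept prefix plus the filtered remainder.
theorem filterA_eq (l : List Int) (i : Nat) :
    filter_negative_loop l i = l.take i ++ (l.drop i).filter (fun x => decide (x < 0)) := by
  fun_induction filter_negative_loop l i with
  | case1 l i h hge ih =>
    rw [ih]
    have hlen : (l.take i).length = i := by simp; omega
    rw [List.eraseIdx_eq_take_drop_succ, List.take_left' hlen, List.drop_left' hlen]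
    rw [List.drop_eq_getElem_cons h, List.filter_cons]
    have hneg : decide (l[i] < 0) = false := by simp; omega
    simp only [hneg, Bool.false_eq_true, if_false]
  | case2 l i h hge ih =>
    rw [ih, List.drop_eq_getElem_cons h]
    have htake : l.take (i+1) = l.take i ++ [l[i]] := by
      rw [List.take_add_one]; simp [List.getElem?_eq_getElem h]
    rw [List.filter_cons]
    have hneg : decide (l[i] < 0) = true := by simp; omega
    simp only [hneg, if_true, htake, List.append_assoc, List.singleton_append]
  | case3 l i h =>
    have hle : l.length ≤ i := by omega
    simp [List.drop_eq_nil_of_le hle, List.take_of_length_le hle]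

-- B's loop invariant.
theorem filterB_eq (xs : List Int) (arr : List Int) (k : Nat)
    (hk : k + xs.length ≤ arr.length) :
    (filter_negative_alt_loop xs (arr, k)).1.take (filter_negative_alt_loop xs (arr, k)).2
      = arr.take k ++ xs.filter (fun x => decide (x < 0)) := by
  induction xs generalizing arr k with
  | nil => simp [filter_negative_alt_loop]
  | cons x rest ih =>
    simp only [filter_negative_alt_loop, List.length_cons] at *
    by_cases hx : x ≥ 0
    · simp only [hx, decide_true, Bool.not_true, Bool.false_eq_true, if_false]
      rw [ih arr k (by omega)]
      have hneg : ¬ (x < 0) := by omega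
      simp [hneg]
    · simp only [hx, decide_false, Bool.not_false, if_true]
      have hk' : k < arr.length := by omega
      rw [ih (arr.set k x) (k+1) (by simp; omega)]
      have htake : (arr.set k x).take (k+1) = arr.take k ++ [x] := by
        rw [List.take_add_one]
        have hset : (arr.set k x).take k = arr.take k := by
          rw [List.take_set]
          exact List.set_eq_of_length_le (by simp)
        simp [hset, hk']
      have hneg : x < 0 := by omega
      simp [htake, hneg]

theorem filter_negative_spec : Claim_equal_filter_negative := by
  intro l _
  unfold Spec_filter_negative filter_negative filter_negative_alt
  have hA := filterA_eq l 0
  have hB := filterB_eq l l 0 (by simp)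
  simp at hA hB
  simp [hA, hB]
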